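-- pv_equiv track=rewrite | github.com/shakarjon2024/mashq3_2511 | main.py | tasnif
-- ===== SOURCE A (Python) =====
-- def tasnif(ismlar):
--     natija = []
--     for ism in ismlar:
--         if len(ism) < 3:
--             natija.append("juda qisqa")
--         elif len(ism) <= 5:
--             natija.append("normal")
--         else:
--             natija.append("uzun")
--     return natija
-- ===== SOURCE B (Python) =====
-- def tasnif(ismlar):
--     # Paint coarse-to-fine in staged passes: start with every slot "uzun",
--     # then repaint slots with length <= 5 as "normal", then slots with
--     # length < 3 as "juda qisqa".
--     lens = [len(ism) for ism in ismlar]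
--     natija = ["uzun"] * len(ismlar)
--     for i in range(len(lens)):
--         if lens[i] <= 5:
--             natija[i] = "normal"
--     for i in range(len(lens)):
--         if lens[i] < 3:
--             natija[i] = "juda qisqa"
--     return natija
-- ===== Notes on version B (the rewrite author's own statement) =====
-- stated objective: alternative
-- what changed: Replaces the single-pass if/elif/else classification with a staged repainting scheme: precompute all lengths, initialise every output slot to 'uzun', then make two overwrite passes that repaint slots with length <= 5 to 'normal' and slots with length < 3 to 'juda qisqa'.
import Mathlib
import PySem

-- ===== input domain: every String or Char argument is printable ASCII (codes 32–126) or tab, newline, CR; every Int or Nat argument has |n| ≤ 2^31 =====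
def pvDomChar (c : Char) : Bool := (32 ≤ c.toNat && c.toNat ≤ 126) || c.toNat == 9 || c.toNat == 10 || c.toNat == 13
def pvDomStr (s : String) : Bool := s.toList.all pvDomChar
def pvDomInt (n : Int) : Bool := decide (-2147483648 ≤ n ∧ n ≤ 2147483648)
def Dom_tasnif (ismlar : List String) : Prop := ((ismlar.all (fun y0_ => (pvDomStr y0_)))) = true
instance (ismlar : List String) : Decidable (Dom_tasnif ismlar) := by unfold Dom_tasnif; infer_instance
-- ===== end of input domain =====

-- B replaces A's single-pass if/elif/else chain with staged repainting passes: all slots start "uzun", then length<=5 slots are overwritten to "normal", then length<3 slots to "juda qisqa" (alternative decomposition; same cost).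


-- ===== PORT A =====
-- A: one loop appending to natija with an if/elif/else on len(ism)
def tasnif (ismlar : List String) : List String :=
  ismlar.foldl (fun natija ism =>
    if PySem.Str.len ism < 3 then natija ++ ["juda qisqa"]
    else if PySem.Str.len ism ≤ 5 then natija ++ ["normal"]
    else natija ++ ["uzun"]) []

-- ===== PORT B =====
-- B: lens precomputed, output initialised to all "uzun", then two index-loop
-- overwrite passes (range(len(lens)) ported as List.range; lens[i]/natija[i]=…
-- as getD/set — i is always in range, so exact).
def tasnif_alt (ismlar : List String) : List String :=
  let lens := ismlar.map PySem.Str.len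
  let natija1 := (List.range lens.length).foldl
    (fun natija i => if lens.getD i 0 ≤ 5 then natija.set i "normal" else natija)
    (List.replicate ismlar.length "uzun")
  (List.range lens.length).foldl
    (fun natija i => if lens.getD i 0 < 3 then natija.set i "juda qisqa" else natija)
    natija1

-- ===== PRECONDITION & SPEC =====
def Spec_tasnif (ismlar : List String) (out : List String) : Prop := out = tasnif_alt ismlar
instance (ismlar : List String) (out : List String) : Decidable (Spec_tasnif ismlar out) := by unfold Spec_tasnif; infer_instance

-- ===== CLAIM (what is proved, stated in full; the proofs are below) =====
def Claim_equal_tasnif : Prop := ∀ (ismlar : List String), Dom_tasnif ismlar → Spec_tasnif ismlar (tasnif ismlar)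

-- ===== LEMMAS AND PROOFS =====
-- a repaint pass preserves the length
lemma paint_length (lens : List Int) (p : Int → Prop) [DecidablePred p] (v : String)
    (n : Nat) (acc : List String) :
    ((List.range n).foldl (fun a i => if p (lens.getD i 0) then a.set i v else a) acc).length
      = acc.length := by
  induction n with
  | zero => simp
  | succ n ih =>
    simp only [List.range_succ, List.foldl_append, List.foldl_cons, List.foldl_nil]
    split
    · rw [List.length_set]; exact ih
    · exact ih

-- element j after a repaint pass over indices < n
lemma paint_getElem (lens : List Int) (p : Int → Prop) [DecidablePred p] (v : String)
    (n : Nat) (acc : List String) (j : Nat) (hj : j < acc.length) :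
    ((List.range n).foldl (fun a i => if p (lens.getD i 0) then a.set i v else a) acc)[j]'
        (by rw [paint_length]; exact hj)
      = if j < n ∧ p (lens.getD j 0) then v else acc[j] := by
  induction n with
  | zero => simp
  | succ n ih =>
    simp only [List.range_succ, List.foldl_append, List.foldl_cons, List.foldl_nil]
    by_cases hp : p (lens.getD n 0)
    · simp only [hp, if_true]
      rw [List.getElem_set]
      by_cases hnj : n = j
      · subst hnj
        rw [if_pos rfl, if_pos ⟨Nat.lt_succ_self n, hp⟩]
      · rw [if_neg hnj, ih]
        have : (j < n + 1 ∧ p (lens.getD j 0)) ↔ (j < n ∧ p (lens.getD j 0)) := by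
          constructor <;> rintro ⟨h1, h2⟩ <;> exact ⟨by omega, h2⟩
        rw [if_congr this rfl rfl]
    · simp only [hp, if_false]
      rw [ih]
      by_cases hjn : j = n
      · subst hjn
        rw [if_neg (fun h => absurd h.1 (lt_irrefl j)), if_neg (fun h => hp h.2)]
      · have : (j < n + 1 ∧ p (lens.getD j 0)) ↔ (j < n ∧ p (lens.getD j 0)) := by
          constructor <;> rintro ⟨h1, h2⟩ <;> exact ⟨by omega, h2⟩
        rw [if_congr this rfl rfl]

-- A's fold with append equals a map (generalized accumulator)
lemma tasnif_fold (ismlar : List String) (acc : List String) :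
    ismlar.foldl (fun natija ism =>
      if PySem.Str.len ism < 3 then natija ++ ["juda qisqa"]
      else if PySem.Str.len ism ≤ 5 then natija ++ ["normal"]
      else natija ++ ["uzun"]) acc
    = acc ++ ismlar.map (fun ism =>
        if PySem.Str.len ism < 3 then "juda qisqa"
        else if PySem.Str.len ism ≤ 5 then "normal" else "uzun") := by
  induction ismlar generalizing acc with
  | nil => simp
  | cons ism rest ih =>
    simp only [List.foldl_cons, List.map_cons]
    split_ifs <;> rw [ih] <;> simp

-- ===== VERDICT (by name: the statement is the Claim_ definition above) =====
theorem tasnif_spec : Claim_equal_tasnif := by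
  intro ismlar _
  unfold Spec_tasnif tasnif tasnif_alt
  rw [tasnif_fold]
  simp only [List.nil_append]
  apply List.ext_getElem
  · rw [paint_length (ismlar.map PySem.Str.len) (fun x => x < 3) "juda qisqa",
        paint_length (ismlar.map PySem.Str.len) (fun x => x ≤ 5) "normal"]
    simp
  · intro j hjA hjB
    have hlen : j < (List.replicate ismlar.length "uzun").length := by
      simp only [List.length_map] at hjA
      simpa using hjA
    have hj1 : j < ((List.range (ismlar.map PySem.Str.len).length).foldl
        (fun a i => if (ismlar.map PySem.Str.len).getD i 0 ≤ 5 then a.set i "normal" else a)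
        (List.replicate ismlar.length "uzun")).length := by
      rw [paint_length (ismlar.map PySem.Str.len) (fun x => x ≤ 5) "normal"]; exact hlen
    rw [paint_getElem _ (fun x => x < 3) _ _ _ j hj1,
        paint_getElem _ (fun x => x ≤ 5) _ _ _ j hlen]
    have hjn : j < ismlar.length := by simpa using hjA
    have hget : (ismlar.map PySem.Str.len).getD j 0 = PySem.Str.len ismlar[j] := by
      rw [List.getD_eq_getElem] <;> simp [hjn]
    simp only [List.getElem_map, List.length_map, hget, List.getElem_replicate, hjn, true_and]
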